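-- pv_equiv track=rewrite | github.com/hoangtuyb96/AlgorithmLearning | KNN/KNN_test.py | getClassResult
-- ===== SOURCE A (Python) =====
-- import operator
--
-- def getClassResult(neighbors):
--     classes = {}
--     for x in range(len(neighbors)):
--         class_result = neighbors[x][-1]
--         if class_result in classes:
--             classes[class_result] += 1
--         else:
--             classes[class_result] = 1
--     sortedClasses = sorted(classes.items(), key=operator.itemgetter(1), reverse=True)
--     return sortedClasses[0][0]
-- ===== SOURCE B (Python) =====
-- def getClassResult(neighbors):
--     counts = {}
--     for row in neighbors:
--         label = row[-1]
--         counts[label] = counts.get(label, 0) + 1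
--     return max(counts, key=counts.get)
-- ===== Notes on version B (the rewrite author's own statement) =====
-- stated objective: simpler
-- what changed: Replaces A's sort of the whole count-dict items (then taking element 0) by a single linear max scan over the dict in insertion order (max with key=counts.get), which returns the first key with maximal count exactly like A's stable reverse sort.
import Mathlib
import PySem

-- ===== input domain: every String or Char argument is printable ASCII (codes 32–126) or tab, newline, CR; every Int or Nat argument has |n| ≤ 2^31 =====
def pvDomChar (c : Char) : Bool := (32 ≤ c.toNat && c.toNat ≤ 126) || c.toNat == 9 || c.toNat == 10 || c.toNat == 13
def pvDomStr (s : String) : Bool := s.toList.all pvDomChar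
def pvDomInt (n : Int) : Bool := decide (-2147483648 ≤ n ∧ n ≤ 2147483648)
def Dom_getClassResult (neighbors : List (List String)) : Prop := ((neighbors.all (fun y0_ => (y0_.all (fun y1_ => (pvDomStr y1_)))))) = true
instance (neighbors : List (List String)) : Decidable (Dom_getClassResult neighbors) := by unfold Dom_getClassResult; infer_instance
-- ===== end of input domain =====

-- B replaces A's sort of the count-dict items by Python's max(counts, key=counts.get):
-- a single scan returning the first key with maximal count (same tie-break as A's stable reverse sort).


-- ===== PORT A =====
-- literal port of A: count classes in a dict over range(len(neighbors)), sort the items by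
-- count descending (stable), return the first item's key.  neighbors[x] and row[-1] are exact
-- via pyGetD/pyGet? (the '.getD' defaults are only reached where Python raises, excluded by Pre_).
def getClassResult (neighbors : List (List String)) : String :=
  let classes : PySem.Dict String Int :=
    (PySem.List.pyRange 0 (PySem.List.len neighbors)).foldl
      (fun classes x =>
        let class_result := (PySem.List.pyGet? (PySem.List.pyGetD neighbors x []) (-1)).getD ""
        if classes.contains class_result then
          classes.insert class_result (classes.getD class_result 0 + 1)
        else
          classes.insert class_result 1)
      PySem.Dict.empty
  let sortedClasses := PySem.List.sorted classes.items (fun p => p.2) true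
  ((PySem.List.pyGet? sortedClasses 0).getD ("", 0)).1

-- ===== PORT B =====
-- literal port of B: one counting loop with get-default, then max(counts, key=counts.get)
-- (PySem.List.max? = Python max: the FIRST key attaining the maximal count).
def getClassResult_alt (neighbors : List (List String)) : String :=
  let counts : PySem.Dict String Int :=
    neighbors.foldl
      (fun counts row =>
        let label := (PySem.List.pyGet? row (-1)).getD ""
        counts.insert label (counts.getD label 0 + 1))
      PySem.Dict.empty
  (PySem.List.max? counts.keys (fun k => counts.getD k 0)).getD ""

-- ===== PRECONDITION & SPEC =====
-- Pre_ excludes exactly the inputs where Python A raises: the empty list (IndexError on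
-- sortedClasses[0]) and any input with an empty row (IndexError on neighbors[x][-1]).
def Pre_getClassResult (neighbors : List (List String)) : Prop :=
  neighbors ≠ [] ∧ ∀ row ∈ neighbors, row ≠ []
instance (neighbors : List (List String)) : Decidable (Pre_getClassResult neighbors) := by
  unfold Pre_getClassResult; infer_instance

def pvWitness_getClassResult : List (List String) :=
  [["1.0", "a"], ["2.0", "b"], ["0.5", "a"]]

def Spec_getClassResult (neighbors : List (List String)) (out : String) : Prop := out = getClassResult_alt neighbors
instance (neighbors : List (List String)) (out : String) : Decidable (Spec_getClassResult neighbors out) := by unfold Spec_getClassResult; infer_instance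

-- ===== CLAIM (what is proved, stated in full; the proofs are below) =====
def Claim_equal_getClassResult : Prop := ∀ (neighbors : List (List String)), Dom_getClassResult neighbors → Pre_getClassResult neighbors → Spec_getClassResult neighbors (getClassResult neighbors)

-- ===== LEMMAS AND PROOFS =====

-- The two counting loops build the same dict: A's index loop is B's loop over the rows
-- (foldl_pyRange_pyGetD), and A's contains-branch equals B's get-with-default insert.
theorem pv_dict_eq (neighbors : List (List String)) :
    (PySem.List.pyRange 0 (PySem.List.len neighbors)).foldl
      (fun classes x =>
        let class_result := (PySem.List.pyGet? (PySem.List.pyGetD neighbors x []) (-1)).getD ""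
        if classes.contains class_result then
          classes.insert class_result (classes.getD class_result 0 + 1)
        else
          classes.insert class_result 1)
      (PySem.Dict.empty : PySem.Dict String Int)
    = neighbors.foldl
      (fun counts row =>
        let label := (PySem.List.pyGet? row (-1)).getD ""
        counts.insert label (counts.getD label 0 + 1))
      PySem.Dict.empty := by
  show (PySem.List.pyRange 0 (PySem.List.len neighbors)).foldl
      (fun classes x =>
        (fun (classes : PySem.Dict String Int) (row : List String) =>
          if classes.contains ((PySem.List.pyGet? row (-1)).getD "") then
            classes.insert ((PySem.List.pyGet? row (-1)).getD "")
              (classes.getD ((PySem.List.pyGet? row (-1)).getD "") 0 + 1)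
          else
            classes.insert ((PySem.List.pyGet? row (-1)).getD "") 1)
          classes (PySem.List.pyGetD neighbors x []))
      PySem.Dict.empty
    = _
  rw [PySem.List.foldl_pyRange_pyGetD neighbors []
      (fun (classes : PySem.Dict String Int) (row : List String) =>
          if classes.contains ((PySem.List.pyGet? row (-1)).getD "") then
            classes.insert ((PySem.List.pyGet? row (-1)).getD "")
              (classes.getD ((PySem.List.pyGet? row (-1)).getD "") 0 + 1)
          else
            classes.insert ((PySem.List.pyGet? row (-1)).getD "") 1)
      PySem.Dict.empty (le_refl 0)]
  simp only [Int.toNat_zero, List.drop_zero]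
  apply PySem.List.foldl_congr_mem
  intro cl row _
  by_cases h : cl.contains ((PySem.List.pyGet? row (-1)).getD "") = true
  · simp [h]
  · simp only [Bool.not_eq_true] at h
    simp [h, PySem.Dict.getD_of_not_contains _ _ h]

-- max? over a mapped list: the fold compares the same keys, so it commutes with Option.map.
theorem pv_max?_map_aux {α β : Type} (f : α → β) (g : β → Int) (l : List α) :
    ∀ acc : Option α,
      l.foldl (fun a x => match a with
        | none => some (f x)
        | some m => if g m < g (f x) then some (f x) else some m) (acc.map f)
      = (l.foldl (fun a x => match a with
        | none => some x
        | some m => if g (f m) < g (f x) then some x else some m) acc).map f := by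
  induction l with
  | nil => intro acc; rfl
  | cons x t ih =>
    intro acc
    cases acc with
    | none => simpa using ih (some x)
    | some m =>
      simp only [List.foldl_cons, Option.map_some]
      by_cases h : g (f m) < g (f x)
      · simpa [h] using ih (some x)
      · simpa [h] using ih (some m)

theorem pv_max?_map {α β : Type} (f : α → β) (g : β → Int) (l : List α) :
    PySem.List.max? (l.map f) g = Option.map f (PySem.List.max? l (fun x => g (f x))) := by
  unfold PySem.List.max?
  rw [List.foldl_map]
  simpa using pv_max?_map_aux f g l none

-- max? only evaluates the key on members of the list (and on the running maximum, which is one).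
theorem pv_max?_congr_aux {α : Type} (k1 k2 : α → Int) (l : List α)
    (h : ∀ x ∈ l, k1 x = k2 x) :
    ∀ acc : Option α, (∀ m, acc = some m → k1 m = k2 m) →
      l.foldl (fun a x => match a with
        | none => some x
        | some m => if k1 m < k1 x then some x else some m) acc
      = l.foldl (fun a x => match a with
        | none => some x
        | some m => if k2 m < k2 x then some x else some m) acc := by
  induction l with
  | nil => intro acc _; rfl
  | cons x t ih =>
    intro acc hacc
    have hx : k1 x = k2 x := h x (by simp)
    have ht : ∀ y ∈ t, k1 y = k2 y := fun y hy => h y (by simp [hy])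
    cases acc with
    | none =>
      simp only [List.foldl_cons]
      exact ih ht (some x) (fun m hm => by cases hm; exact hx)
    | some m =>
      have hm : k1 m = k2 m := hacc m rfl
      simp only [List.foldl_cons, hm, hx]
      by_cases hlt : k2 m < k2 x
      · simp only [hlt, if_pos]
        exact ih ht (some x) (fun m' hm' => by cases hm'; exact hx)
      · simp only [hlt, if_false]
        exact ih ht (some m) (fun m' hm' => by cases hm'; exact hm)

theorem pv_max?_congr {α : Type} (k1 k2 : α → Int) (l : List α)
    (h : ∀ x ∈ l, k1 x = k2 x) :
    PySem.List.max? l k1 = PySem.List.max? l k2 := by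
  unfold PySem.List.max?
  exact pv_max?_congr_aux k1 k2 l h none (by simp)

-- head of insertBy with the reverse-sort comparator is the max?-fold step.
theorem pv_head_insertBy {α : Type} (key : α → Int) (x : α) (acc : List α) :
    (PySem.List.insertBy (fun a b => decide (key b < key a)) x acc).head?
      = some (match acc.head? with
        | none => x
        | some m => if key m < key x then x else m) := by
  cases acc with
  | nil => rfl
  | cons y ys =>
    by_cases h : key y < key x
    · simp [PySem.List.insertBy, h]
    · simp [PySem.List.insertBy, h]

theorem pv_head_sorted_rev_aux {α : Type} (key : α → Int) (l : List α) :
    ∀ acc : List α,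
      (l.foldl (fun a x => PySem.List.insertBy (fun a b => decide (key b < key a)) x a) acc).head?
      = l.foldl (fun a x => match a with
          | none => some x
          | some m => if key m < key x then some x else some m) acc.head? := by
  induction l with
  | nil => intro acc; rfl
  | cons x t ih =>
    intro acc
    simp only [List.foldl_cons]
    rw [ih]
    congr 1
    rw [pv_head_insertBy]
    cases acc with
    | nil => rfl
    | cons y ys => by_cases h : key y < key x <;> simp [h]

-- the head of a stable reverse sort is the FIRST element with maximal key, i.e. Python max.
theorem pv_head_sorted_rev {α : Type} (l : List α) (key : α → Int) :
    (PySem.List.sorted l key true).head? = PySem.List.max? l key := by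
  rw [PySem.List.sorted_rev_eq_foldl_insertBy]
  exact pv_head_sorted_rev_aux key l []

-- the counting fold never empties a nonempty dict.
theorem pv_fold_ne_nil (l : List (List String)) (d : PySem.Dict String Int)
    (hd : d.items ≠ []) :
    (l.foldl
      (fun counts row =>
        let label := (PySem.List.pyGet? row (-1)).getD ""
        counts.insert label (counts.getD label 0 + 1))
      d).items ≠ [] := by
  induction l generalizing d with
  | nil => exact hd
  | cons r t ih =>
    simp only [List.foldl_cons]
    apply ih
    simp only [PySem.Dict.insert]
    split_ifs <;> simp [hd]

-- main equality, stated on the unfolded bodies of the two ports (after pv_dict_eq).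
theorem pv_main (neighbors : List (List String))
    (h1 : neighbors ≠ []) :
    (let classes : PySem.Dict String Int :=
      neighbors.foldl
        (fun counts row =>
          let label := (PySem.List.pyGet? row (-1)).getD ""
          counts.insert label (counts.getD label 0 + 1))
        PySem.Dict.empty
     let sortedClasses := PySem.List.sorted classes.items (fun p => p.2) true
     ((PySem.List.pyGet? sortedClasses 0).getD ("", 0)).1)
    =
    (let counts : PySem.Dict String Int :=
      neighbors.foldl
        (fun counts row =>
          let label := (PySem.List.pyGet? row (-1)).getD ""
          counts.insert label (counts.getD label 0 + 1))
        PySem.Dict.empty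
     (PySem.List.max? counts.keys (fun k => counts.getD k 0)).getD "") := by
  simp only []
  set d : PySem.Dict String Int :=
      neighbors.foldl
        (fun counts row =>
          let label := (PySem.List.pyGet? row (-1)).getD ""
          counts.insert label (counts.getD label 0 + 1))
        PySem.Dict.empty with hdd
  have hne : d.items ≠ [] := by
    cases neighbors with
    | nil => exact absurd rfl h1
    | cons r rs =>
      rw [hdd]
      simp only [List.foldl_cons]
      exact pv_fold_ne_nil rs _
        (by simp [PySem.Dict.insert, PySem.Dict.contains, PySem.Dict.empty])
  have hnodup : d.keys.Nodup := by
    rw [hdd]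
    exact PySem.Dict.nodup_keys_foldl_insert_key neighbors
      (fun row => (PySem.List.pyGet? row (-1)).getD "")
      (fun counts row => counts.getD ((PySem.List.pyGet? row (-1)).getD "") 0 + 1)
      PySem.Dict.empty PySem.Dict.nodup_keys_empty
  obtain ⟨m, hm⟩ : ∃ m, PySem.List.max? d.items (fun p => p.2) = some m := by
    cases hq : PySem.List.max? d.items (fun p => p.2) with
    | none => exact absurd ((PySem.List.max?_eq_none_iff _ _).1 hq) hne
    | some m => exact ⟨m, rfl⟩
  have hs : (PySem.List.sorted d.items (fun p => p.2) true).head? = some m := by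
    rw [pv_head_sorted_rev]; exact hm
  obtain ⟨t, hts⟩ : ∃ t, PySem.List.sorted d.items (fun p => p.2) true = m :: t := by
    cases hq : PySem.List.sorted d.items (fun p => p.2) true with
    | nil => rw [hq] at hs; simp at hs
    | cons a t => rw [hq] at hs; simp at hs; exact ⟨t, by rw [hs]⟩
  rw [hts]
  have hkeys : d.keys = d.items.map Prod.fst := rfl
  rw [hkeys, pv_max?_map Prod.fst (fun k => d.getD k 0) d.items,
    pv_max?_congr (fun p => d.getD p.1 0) (fun p => p.2) d.items
      (fun p hp => PySem.Dict.getD_of_mem_items d (by simpa using hp) hnodup 0),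
    hm]
  simp [PySem.List.pyGet?, PySem.List.pyIdx?]

-- ===== VERDICT (by name: the statement is the Claim_ definition above) =====
theorem getClassResult_spec : Claim_equal_getClassResult := by
  intro neighbors _ hpre
  unfold Spec_getClassResult getClassResult getClassResult_alt
  rw [pv_dict_eq]
  exact pv_main neighbors hpre.1
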